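-- pv_equiv track=rewrite | github.com/vsawhney27/Foqal-ML-Internship | ml_models/text_classifier.py | _categorize_technologies
-- ===== SOURCE A (Python) =====
-- from typing import List, Dict, Any, Tuple
--
-- def _categorize_technologies(tech_list: List[str]) -> Dict[str, List[str]]:
--     """Categorize technologies into different types"""
--     categories = {
--         'Programming Languages': ['Python', 'Java', 'JavaScript', 'TypeScript', 'Go', 'Rust', 'C++', 'C#', 'PHP', 'Ruby', 'Swift', 'Kotlin'],
--         'Web Frameworks': ['React', 'Angular', 'Vue', 'Django', 'Flask', 'Express', 'Node.js', 'Next.js', 'Laravel', 'Rails'],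
--         'Cloud Platforms': ['AWS', 'Azure', 'GCP', 'Google Cloud', 'Docker', 'Kubernetes'],
--         'Databases': ['PostgreSQL', 'MySQL', 'MongoDB', 'Redis', 'Elasticsearch', 'Cassandra', 'DynamoDB'],
--         'DevOps Tools': ['Jenkins', 'GitLab CI', 'GitHub Actions', 'Terraform', 'Ansible', 'Grafana', 'Prometheus'],
--         'AI/ML Libraries': ['TensorFlow', 'PyTorch', 'Scikit-learn', 'Pandas', 'NumPy', 'Keras']
--     }
--
--     result = {cat: [] for cat in categories.keys()}
--
--     for tech in tech_list:
--         for category, tech_names in categories.items():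
--             if tech in tech_names:
--                 result[category].append(tech)
--                 break
--
--     return result
-- ===== SOURCE B (Python) =====
-- from typing import List, Dict
--
-- def _categorize_technologies(tech_list: List[str]) -> Dict[str, List[str]]:
--     """Categorize technologies into different types"""
--     categories = {
--         'Programming Languages': ['Python', 'Java', 'JavaScript', 'TypeScript', 'Go', 'Rust', 'C++', 'C#', 'PHP', 'Ruby', 'Swift', 'Kotlin'],
--         'Web Frameworks': ['React', 'Angular', 'Vue', 'Django', 'Flask', 'Express', 'Node.js', 'Next.js', 'Laravel', 'Rails'],
--         'Cloud Platforms': ['AWS', 'Azure', 'GCP', 'Google Cloud', 'Docker', 'Kubernetes'],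
--         'Databases': ['PostgreSQL', 'MySQL', 'MongoDB', 'Redis', 'Elasticsearch', 'Cassandra', 'DynamoDB'],
--         'DevOps Tools': ['Jenkins', 'GitLab CI', 'GitHub Actions', 'Terraform', 'Ansible', 'Grafana', 'Prometheus'],
--         'AI/ML Libraries': ['TensorFlow', 'PyTorch', 'Scikit-learn', 'Pandas', 'NumPy', 'Keras']
--     }
--
--     category_of = {name: cat for cat, names in categories.items() for name in names}
--     result = {cat: [] for cat in categories}
--     for tech in tech_list:
--         cat = category_of.get(tech)
--         if cat is not None:
--             result[cat].append(tech)
--     return result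
-- ===== Notes on version B (the rewrite author's own statement) =====
-- stated objective: faster
-- what changed: Replaces the nested scan over every category's name list (with break) by a reverse-lookup dict built once from the category table, so each technology is classified by a single dict lookup instead of an inner loop over all category lists.
import Mathlib
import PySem

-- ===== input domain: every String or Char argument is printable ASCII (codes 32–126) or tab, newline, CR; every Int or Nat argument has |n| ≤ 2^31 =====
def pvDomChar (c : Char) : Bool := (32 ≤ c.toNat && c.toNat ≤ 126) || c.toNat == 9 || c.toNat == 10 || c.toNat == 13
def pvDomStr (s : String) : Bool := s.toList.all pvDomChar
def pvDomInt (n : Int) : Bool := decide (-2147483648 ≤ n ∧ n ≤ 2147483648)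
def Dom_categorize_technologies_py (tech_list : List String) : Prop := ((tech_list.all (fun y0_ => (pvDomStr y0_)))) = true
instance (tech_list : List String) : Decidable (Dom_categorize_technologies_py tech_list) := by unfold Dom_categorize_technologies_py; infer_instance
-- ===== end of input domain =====

-- B replaces A's inner scan-with-break over the category lists by a reverse-lookup dict built once (more idiomatic, one pass per tech).

-- ===== PORT A =====
-- the literal `categories` table (shared module constant of both versions)
def pvCategories : List (String × List String) :=
  [("Programming Languages", ["Python", "Java", "JavaScript", "TypeScript", "Go", "Rust", "C++", "C#", "PHP", "Ruby", "Swift", "Kotlin"]),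
   ("Web Frameworks", ["React", "Angular", "Vue", "Django", "Flask", "Express", "Node.js", "Next.js", "Laravel", "Rails"]),
   ("Cloud Platforms", ["AWS", "Azure", "GCP", "Google Cloud", "Docker", "Kubernetes"]),
   ("Databases", ["PostgreSQL", "MySQL", "MongoDB", "Redis", "Elasticsearch", "Cassandra", "DynamoDB"]),
   ("DevOps Tools", ["Jenkins", "GitLab CI", "GitHub Actions", "Terraform", "Ansible", "Grafana", "Prometheus"]),
   ("AI/ML Libraries", ["TensorFlow", "PyTorch", "Scikit-learn", "Pandas", "NumPy", "Keras"])]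

-- A's inner `for category, tech_names in categories.items(): if tech in tech_names: …; break`
def pvAInner (tech : String) (cats : List (String × List String))
    (result : PySem.Dict String (List String)) : PySem.Dict String (List String) :=
  match cats with
  | [] => result
  | (category, tech_names) :: rest =>
      if tech_names.contains tech then result.modify category [] (· ++ [tech])
      else pvAInner tech rest result

def categorize_technologies_py (tech_list : List String) : List (String × List String) :=
  (tech_list.foldl (fun result tech => pvAInner tech pvCategories result)
    (PySem.Dict.ofList (pvCategories.map (fun p => (p.1, ([] : List String)))))).items

-- ===== PORT B =====
-- category_of = {name: cat for cat, names in categories.items() for name in names}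
def pvCategoryOf : PySem.Dict String String :=
  PySem.Dict.ofList (pvCategories.flatMap (fun p => p.2.map (fun n => (n, p.1))))

def categorize_technologies_py_alt (tech_list : List String) : List (String × List String) :=
  (tech_list.foldl (fun result tech =>
      match pvCategoryOf.get? tech with
      | some cat => result.modify cat [] (· ++ [tech])
      | none => result)
    (PySem.Dict.ofList (pvCategories.map (fun p => (p.1, ([] : List String)))))).items

-- ===== PRECONDITION & SPEC =====
def Spec_categorize_technologies_py (tech_list : List String) (out : List (String × List String)) : Prop := out = categorize_technologies_py_alt tech_list
instance (tech_list : List String) (out : List (String × List String)) : Decidable (Spec_categorize_technologies_py tech_list out) := by unfold Spec_categorize_technologies_py; infer_instance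

-- ===== CLAIM (what is proved, stated in full; the proofs are below) =====
def Claim_equal_categorize_technologies_py : Prop := ∀ (tech_list : List String), Dom_categorize_technologies_py tech_list → Spec_categorize_technologies_py tech_list (categorize_technologies_py tech_list)

-- ===== LEMMAS AND PROOFS =====

-- first match in the reversed pairs of one category's name list
theorem pv_find_map_names (tech c : String) (names : List String) :
    Option.map (·.2) ((names.map (fun n => (n, c))).find? (fun q => q.1 == tech))
      = if tech ∈ names then some c else none := by
  induction names with
  | nil => simp
  | cons n rest ih =>
      simp only [List.map_cons, List.find?_cons]
      by_cases h : n = tech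
      · simp [h]
      · have hb : (n == tech) = false := by simp [h]
        have hmem : (tech ∈ n :: rest) ↔ tech ∈ rest := by
          rw [List.mem_cons]
          exact or_iff_right (fun e => h (Eq.symm e))
        rw [if_congr hmem rfl rfl, hb]
        exact ih

-- A's inner loop equals a first-match lookup in the flattened reverse pairs
theorem pv_inner_eq_find (tech : String) (cats : List (String × List String))
    (result : PySem.Dict String (List String)) :
    pvAInner tech cats result =
      match Option.map (·.2) ((cats.flatMap (fun p => p.2.map (fun n => (n, p.1)))).find?
          (fun q => q.1 == tech)) with
      | some cat => result.modify cat [] (· ++ [tech])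
      | none => result := by
  induction cats with
  | nil => simp [pvAInner]
  | cons p rest ih =>
      obtain ⟨c, names⟩ := p
      rw [List.flatMap_cons, List.find?_append]
      have hfind := pv_find_map_names tech c names
      by_cases h : tech ∈ names
      · rw [if_pos h] at hfind
        rw [Option.map_eq_some_iff] at hfind
        obtain ⟨q, hq, hq2⟩ := hfind
        have hc : names.contains tech = true := by simpa using h
        rw [hq, Option.some_or]
        simp only [Option.map_some, hq2]
        simp [pvAInner, h]
      · rw [if_neg h] at hfind
        have hf : (names.map (fun n => (n, c))).find? (fun q => q.1 == tech) = none := by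
          simpa using hfind
        have hc : names.contains tech = false := by simpa using h
        rw [hf, Option.none_or]
        simp only [pvAInner, hc, Bool.false_eq_true, if_false]
        exact ih

-- the reverse dict's items are exactly the flattened pairs (all 48 keys are distinct)
set_option maxRecDepth 8192 in
theorem pv_categoryOf_items :
    pvCategoryOf.items = pvCategories.flatMap (fun p => p.2.map (fun n => (n, p.1))) := by
  decide

theorem pv_step_eq (tech : String) (result : PySem.Dict String (List String)) :
    pvAInner tech pvCategories result =
      match pvCategoryOf.get? tech with
      | some cat => result.modify cat [] (· ++ [tech])
      | none => result := by
  rw [pv_inner_eq_find]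
  simp only [PySem.Dict.get?, pv_categoryOf_items]

-- ===== VERDICT (by name: the statement is the Claim_ definition above) =====
set_option maxRecDepth 8192 in
theorem categorize_technologies_py_spec : Claim_equal_categorize_technologies_py := by
  intro tech_list _
  unfold Spec_categorize_technologies_py categorize_technologies_py categorize_technologies_py_alt
  congr 1
  apply List.foldl_ext
  intro result tech _
  exact pv_step_eq tech result
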